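-- pv_equiv track=rewrite | github.com/CuriousN006/AnsysConnector | src/ansys_connector/products/fluent/session.py | _tokenize_path
-- ===== SOURCE A (Python) =====
-- def _tokenize_path(path: str) -> list[str]:
--     normalized = path.strip().replace("/", ".")
--     if normalized.startswith("settings."):
--         normalized = normalized[len("settings.") :]
--     if not normalized:
--         return []
--
--     tokens: list[str] = []
--     current = []
--     bracket_depth = 0
--     for char in normalized:
--         if char == "." and bracket_depth == 0:
--             token = "".join(current).strip()
--             if token:
--                 tokens.append(token)
--             current = []
--             continue
--         if char == "[":
--             bracket_depth += 1
--         elif char == "]":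
--             bracket_depth -= 1
--         current.append(char)
--
--     token = "".join(current).strip()
--     if token:
--         tokens.append(token)
--     return tokens
-- ===== SOURCE B (Python) =====
-- def _tokenize_path(path: str) -> list[str]:
--     normalized = path.strip().replace("/", ".")
--     if normalized.startswith("settings."):
--         normalized = normalized[len("settings.") :]
--     if not normalized:
--         return []
--
--     # Pass 1: record the index of every '.' that sits outside brackets.
--     splits: list[int] = []
--     depth = 0
--     for i, char in enumerate(normalized):
--         if char == "." and depth == 0:
--             splits.append(i)
--         elif char == "[":
--             depth += 1
--         elif char == "]":
--             depth -= 1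
--
--     # Pass 2: slice the segments between consecutive boundaries.
--     bounds = [-1] + splits + [len(normalized)]
--     tokens: list[str] = []
--     for start, end in zip(bounds, bounds[1:]):
--         token = normalized[start + 1 : end].strip()
--         if token:
--             tokens.append(token)
--     return tokens
-- ===== Notes on version B (the rewrite author's own statement) =====
-- stated objective: alternative
-- what changed: Replaces the single-pass character-buffer accumulator with a two-pass decomposition: first collect the indices of top-level dots, then slice, strip and filter the segments between consecutive boundaries.
import Mathlib
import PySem

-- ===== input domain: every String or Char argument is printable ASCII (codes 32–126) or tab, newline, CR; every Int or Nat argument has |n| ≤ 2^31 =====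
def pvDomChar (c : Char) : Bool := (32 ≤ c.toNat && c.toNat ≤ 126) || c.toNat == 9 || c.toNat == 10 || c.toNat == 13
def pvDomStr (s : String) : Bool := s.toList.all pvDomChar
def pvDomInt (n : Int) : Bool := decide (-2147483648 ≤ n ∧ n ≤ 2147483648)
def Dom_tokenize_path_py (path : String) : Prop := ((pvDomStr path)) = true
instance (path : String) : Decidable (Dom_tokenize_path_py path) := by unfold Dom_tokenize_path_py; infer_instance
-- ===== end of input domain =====

-- B re-implements the tokenizer as two passes (collect top-level-dot indices, then slice the
-- segments between boundaries) instead of A's single pass with a growing character buffer;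
-- objective: alternative decomposition, same asymptotic cost.

-- ===== PORT A =====
-- loop body of A's 'for char in normalized' (state: tokens, current, bracket_depth)
def pvAStep (st : List String × List Char × Int) (c : Char) : List String × List Char × Int :=
  if c = '.' ∧ st.2.2 = 0 then
    let token := PySem.Chars.strip st.2.1
    (if token ≠ [] then st.1 ++ [String.ofList token] else st.1, [], st.2.2)
  else
    let d := if c = '[' then st.2.2 + 1 else if c = ']' then st.2.2 - 1 else st.2.2
    (st.1, st.2.1 ++ [c], d)

def tokenize_path_py (path : String) : List String :=
  let normalized0 := PySem.Str.replace (PySem.Str.strip path) "/" "."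
  let normalized := if PySem.Str.startswith normalized0 "settings."
                    then PySem.Str.slice normalized0 (some 9) none else normalized0
  if normalized.toList = [] then []
  else
    let st := normalized.toList.foldl pvAStep ([], [], 0)
    let token := PySem.Chars.strip st.2.1
    if token ≠ [] then st.1 ++ [String.ofList token] else st.1

-- ===== PORT B =====
-- loop body of B's pass 1 (state: split positions, bracket depth), over enumerate(normalized)
def pvBStep1 (st : List Int × Int) (ic : Int × Char) : List Int × Int :=
  if ic.2 = '.' ∧ st.2 = 0 then (st.1 ++ [ic.1], st.2)
  else if ic.2 = '[' then (st.1, st.2 + 1)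
  else if ic.2 = ']' then (st.1, st.2 - 1)
  else st

-- loop body of B's pass 2 over zip(bounds, bounds[1:])
def pvBStep2 (cs : List Char) (acc : List String) (p : Int × Int) : List String :=
  let token := PySem.Chars.strip (PySem.List.slice cs (some (p.1 + 1)) (some p.2))
  if token ≠ [] then acc ++ [String.ofList token] else acc

def tokenize_path_py_alt (path : String) : List String :=
  let normalized0 := PySem.Str.replace (PySem.Str.strip path) "/" "."
  let normalized := if PySem.Str.startswith normalized0 "settings."
                    then PySem.Str.slice normalized0 (some 9) none else normalized0
  if normalized.toList = [] then []
  else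
    let cs := normalized.toList
    let res := (PySem.List.enumerate cs 0).foldl pvBStep1 ([], 0)
    let bounds : List Int := -1 :: (res.1 ++ [(cs.length : Int)])
    (bounds.zip bounds.tail).foldl (pvBStep2 cs) []

-- ===== PRECONDITION & SPEC =====
def Spec_tokenize_path_py (path : String) (out : List String) : Prop := out = tokenize_path_py_alt path
instance (path : String) (out : List String) : Decidable (Spec_tokenize_path_py path out) := by unfold Spec_tokenize_path_py; infer_instance

-- ===== CLAIM (what is proved, stated in full; the proofs are below) =====
def Claim_equal_tokenize_path_py : Prop := ∀ (path : String), Dom_tokenize_path_py path → Spec_tokenize_path_py path (tokenize_path_py path)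

-- ===== LEMMAS AND PROOFS =====

-- depth update performed by both loops on a non-splitting character
def pvUpd (d : Int) (c : Char) : Int :=
  if c = '[' then d + 1 else if c = ']' then d - 1 else d

-- the segments of a char list cut at top-level dots (common reference decomposition)
def pvSegs : List Char → Int → List (List Char)
  | [], _ => [[]]
  | c :: r, d =>
    if c = '.' ∧ d = 0 then [] :: pvSegs r d
    else
      match pvSegs r (pvUpd d c) with
      | [] => [[c]]
      | s :: rest => (c :: s) :: rest

-- strip each segment and keep the non-empty ones
def pvToks : List (List Char) → List String
  | [] => []
  | s :: r =>
    (if PySem.Chars.strip s ≠ [] then [String.ofList (PySem.Chars.strip s)] else []) ++ pvToks r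

def pvPre (cur : List Char) : List (List Char) → List (List Char)
  | [] => [cur]
  | s :: r => (cur ++ s) :: r

lemma pvSegs_ne_nil (l : List Char) (d : Int) : pvSegs l d ≠ [] := by
  cases l with
  | nil => simp [pvSegs]
  | cons c r =>
    simp only [pvSegs]
    split
    · simp
    · cases h : pvSegs r (pvUpd d c) <;> simp

lemma pvPre_nil {ss : List (List Char)} (h : ss ≠ []) : pvPre [] ss = ss := by
  cases ss with
  | nil => exact absurd rfl h
  | cons s r => simp [pvPre]

lemma pvPre_pre (cur : List Char) (c : Char) (ss : List (List Char)) :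
    pvPre cur (pvPre [c] ss) = pvPre (cur ++ [c]) ss := by
  cases ss <;> simp [pvPre]

lemma pvSegs_cons_else {c : Char} {d : Int} (h : ¬ (c = '.' ∧ d = 0)) (r : List Char) :
    pvSegs (c :: r) d = pvPre [c] (pvSegs r (pvUpd d c)) := by
  simp only [pvSegs, if_neg h]
  cases hs : pvSegs r (pvUpd d c) <;> simp [pvPre]

-- A's loop, characterized by pvSegs
lemma pvA_loop (l : List Char) (toks : List String) (cur : List Char) (d : Int) :
    (let st := l.foldl pvAStep (toks, cur, d)
     let token := PySem.Chars.strip st.2.1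
     if token ≠ [] then st.1 ++ [String.ofList token] else st.1)
    = toks ++ pvToks (pvPre cur (pvSegs l d)) := by
  induction l generalizing toks cur d with
  | nil => simp [pvSegs, pvPre, pvToks]; split <;> simp
  | cons c r ih =>
    simp only [List.foldl_cons]
    by_cases h : c = '.' ∧ d = 0
    · rw [show pvAStep (toks, cur, d) c =
          (if PySem.Chars.strip cur ≠ [] then toks ++ [String.ofList (PySem.Chars.strip cur)] else toks, [], d) by
        simp [pvAStep, h]]
      rw [ih]
      rw [pvPre_nil (pvSegs_ne_nil r d)]
      obtain ⟨hc, hd⟩ := h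
      subst hc; subst hd
      simp only [pvSegs, pvPre]
      split <;> rename_i hh <;> simp [pvToks, hh]
    · rw [show pvAStep (toks, cur, d) c = (toks, cur ++ [c], pvUpd d c) by
        simp [pvAStep, pvUpd, if_neg h]]
      rw [ih, pvSegs_cons_else h, pvPre_pre]

-- positions (from offset p) of top-level dots
def pvSplits : List Char → Nat → Int → List Nat
  | [], _, _ => []
  | c :: r, p, d =>
    if c = '.' ∧ d = 0 then p :: pvSplits r (p + 1) d
    else pvSplits r (p + 1) (pvUpd d c)

lemma pvSplits_ge (l : List Char) (p : Nat) (d : Int) :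
    ∀ i ∈ pvSplits l p d, p ≤ i := by
  induction l generalizing p d with
  | nil => simp [pvSplits]
  | cons c r ih =>
    intro i hi
    simp only [pvSplits] at hi
    split at hi
    · rcases List.mem_cons.1 hi with h | h
      · omega
      · have := ih (p + 1) d i h; omega
    · have := ih (p + 1) (pvUpd d c) i hi; omega

lemma pvSplits_pairwise (l : List Char) (p : Nat) (d : Int) :
    (pvSplits l p d).Pairwise (· < ·) := by
  induction l generalizing p d with
  | nil => simp [pvSplits]
  | cons c r ih =>
    simp only [pvSplits]
    split
    · refine List.pairwise_cons.2 ⟨?_, ih (p + 1) d⟩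
      intro j hj
      have := pvSplits_ge r (p + 1) d j hj; omega
    · exact ih (p + 1) (pvUpd d c)

-- B's pass 1 computes exactly those positions
lemma pvB1_loop (l : List Char) (p : Nat) (d : Int) (acc : List Int) :
    (PySem.List.enumerate l (p : Int)).foldl pvBStep1 (acc, d)
    = (acc ++ (pvSplits l p d).map (fun n => (n : Int)), l.foldl pvUpd d) := by
  induction l generalizing p d acc with
  | nil => simp [PySem.List.enumerate_nil, pvSplits]
  | cons c r ih =>
    rw [PySem.List.enumerate_cons]
    simp only [List.foldl_cons]
    by_cases h : c = '.' ∧ d = 0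
    · rw [show pvBStep1 (acc, d) ((p : Int), c) = (acc ++ [(p : Int)], d) by
        simp [pvBStep1, h]]
      rw [show ((p : Int) + 1) = ((p + 1 : Nat) : Int) by push_cast; ring]
      rw [ih]
      obtain ⟨hc, hd⟩ := h; subst hc; subst hd
      simp [pvSplits, pvUpd]
    · rw [show pvBStep1 (acc, d) ((p : Int), c) = (acc, pvUpd d c) by
        rcases h' : (c = '[' : Bool) with _ | _ <;>
        simp [pvBStep1, pvUpd, h] <;> split_ifs <;> simp_all]
      rw [show ((p : Int) + 1) = ((p + 1 : Nat) : Int) by push_cast; ring]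
      rw [ih]
      simp [pvSplits, if_neg h, pvUpd]

-- segments read off a position list by slicing (Nat form of B's pass 2 data)
def pvSegsFS (l : List Char) : List Nat → Nat → List (List Char)
  | [], p => [l.drop p]
  | i :: rest, p => (l.drop p).take (i - p) :: pvSegsFS l rest (i + 1)

lemma pvSegsFS_cons (l : List Char) (S : List Nat) (p : Nat) (c : Char) (r : List Char)
    (hd : l.drop p = c :: r) (hS : ∀ i ∈ S, p + 1 ≤ i) :
    pvSegsFS l S p = pvPre [c] (pvSegsFS l S (p + 1)) := by
  have hdrop : l.drop (p + 1) = r := by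
    rw [← List.tail_drop, hd]; rfl
  cases S with
  | nil => simp [pvSegsFS, hd, hdrop, pvPre]
  | cons i rest =>
    have hip : p + 1 ≤ i := hS i (List.mem_cons_self ..)
    simp only [pvSegsFS, pvPre, hd, hdrop]
    congr 1
    rw [show i - p = (i - (p + 1)) + 1 by omega]
    simp

lemma pvSegsFS_eq_segs (l : List Char) :
    ∀ (t : List Char) (p : Nat) (d : Int), l.drop p = t →
      pvSegsFS l (pvSplits t p d) p = pvSegs t d := by
  intro t
  induction t with
  | nil => intro p d h; simp [pvSplits, pvSegsFS, pvSegs, h]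
  | cons c r ih =>
    intro p d h
    have hdrop : l.drop (p + 1) = r := by
      rw [← List.tail_drop, h]; rfl
    by_cases hc : c = '.' ∧ d = 0
    · simp only [pvSplits, if_pos hc, pvSegsFS]
      obtain ⟨hc1, hd1⟩ := hc; subst hc1; subst hd1
      simp only [pvSegs]
      rw [ih (p + 1) 0 hdrop]
      simp
    · simp only [pvSplits, if_neg hc]
      rw [pvSegsFS_cons l _ p c r h (pvSplits_ge r (p + 1) (pvUpd d c)),
          ih (p + 1) (pvUpd d c) hdrop, pvSegs_cons_else hc]

lemma pvB1_loop0 (l : List Char) (d : Int) (acc : List Int) :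
    (PySem.List.enumerate l 0).foldl pvBStep1 (acc, d)
    = (acc ++ (pvSplits l 0 d).map (fun n => (n : Int)), l.foldl pvUpd d) := by
  have h := pvB1_loop l 0 d acc
  simpa using h

-- B's pass 2, characterized by pvSegsFS
lemma pvB2_loop (cs : List Char) (S : List Nat) (a : Int) (acc : List String)
    (ha : 0 ≤ a + 1) (hpw : S.Pairwise (· < ·)) :
    ((a :: (S.map (fun n => (n : Int)) ++ [(cs.length : Int)])).zip
      (S.map (fun n => (n : Int)) ++ [(cs.length : Int)])).foldl (pvBStep2 cs) acc
    = acc ++ pvToks (pvSegsFS cs S (a + 1).toNat) := by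
  induction S generalizing a acc with
  | nil =>
    have hslice : PySem.List.slice cs (some (a + 1)) (some (cs.length : Int))
        = cs.drop (a + 1).toNat := by
      rw [PySem.List.slice_toNat cs ha (by positivity)]
      apply List.take_of_length_le
      simp
    have hstep : pvBStep2 cs acc (a, (cs.length : Int)) =
        acc ++ (if PySem.Chars.strip (cs.drop (a + 1).toNat) ≠ []
                then [String.ofList (PySem.Chars.strip (cs.drop (a + 1).toNat))] else []) := by
      simp only [pvBStep2, hslice]
      split <;> simp
    show pvBStep2 cs acc (a, (cs.length : Int)) = acc ++ pvToks (pvSegsFS cs [] (a + 1).toNat)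
    rw [hstep]
    simp [pvSegsFS, pvToks]
  | cons i rest ih =>
    have hslice : PySem.List.slice cs (some (a + 1)) (some (i : Int))
        = (cs.drop (a + 1).toNat).take (i - (a + 1).toNat) := by
      rw [PySem.List.slice_toNat cs ha (by positivity)]
      simp
    have hstep : pvBStep2 cs acc ((a, (i : Int))) =
        acc ++ (if PySem.Chars.strip ((cs.drop (a + 1).toNat).take (i - (a + 1).toNat)) ≠ []
                then [String.ofList (PySem.Chars.strip ((cs.drop (a + 1).toNat).take (i - (a + 1).toNat)))]
                else []) := by
      simp only [pvBStep2, hslice]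
      split <;> simp
    show ((((i : Int)) :: (rest.map (fun n => (n : Int)) ++ [(cs.length : Int)])).zip
        (rest.map (fun n => (n : Int)) ++ [(cs.length : Int)])).foldl (pvBStep2 cs)
        (pvBStep2 cs acc (a, (i : Int)))
      = acc ++ pvToks (pvSegsFS cs (i :: rest) (a + 1).toNat)
    rw [hstep]
    rw [ih (i : Int) _ (by positivity) (List.pairwise_cons.1 hpw).2]
    have htn : ((i : Int) + 1).toNat = i + 1 := by omega
    simp only [htn, pvSegsFS, pvToks, List.append_assoc]

-- the two else-branches agree on any normalized string
lemma pvMain (ns : String) :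
    (let st := ns.toList.foldl pvAStep ([], [], 0)
     let token := PySem.Chars.strip st.2.1
     if token ≠ [] then st.1 ++ [String.ofList token] else st.1)
    = (let cs := ns.toList
       let res := (PySem.List.enumerate cs 0).foldl pvBStep1 ([], 0)
       let bounds : List Int := -1 :: (res.1 ++ [(cs.length : Int)])
       (bounds.zip bounds.tail).foldl (pvBStep2 cs) []) := by
  rw [pvA_loop ns.toList [] [] 0]
  simp only []
  rw [pvB1_loop0 ns.toList 0 []]
  simp only [List.nil_append, List.tail_cons]
  rw [pvB2_loop ns.toList (pvSplits ns.toList 0 0) (-1) [] (by norm_num)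
    (pvSplits_pairwise ns.toList 0 0)]
  rw [show ((-1 : Int) + 1).toNat = 0 by norm_num]
  rw [pvSegsFS_eq_segs ns.toList ns.toList 0 0 (by simp)]
  rw [pvPre_nil (pvSegs_ne_nil ns.toList 0)]
  simp

-- both ports, after the shared normalization, as a function of the normalized string
lemma pvWhole (ns : String) :
    (if ns.toList = [] then []
     else
       let st := ns.toList.foldl pvAStep ([], [], 0)
       let token := PySem.Chars.strip st.2.1
       if token ≠ [] then st.1 ++ [String.ofList token] else st.1)
    = (if ns.toList = [] then []
       else
         let cs := ns.toList
         let res := (PySem.List.enumerate cs 0).foldl pvBStep1 ([], 0)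
         let bounds : List Int := -1 :: (res.1 ++ [(cs.length : Int)])
         (bounds.zip bounds.tail).foldl (pvBStep2 cs) []) := by
  by_cases h : ns.toList = []
  · simp [h]
  · simp only [if_neg h]
    exact pvMain ns

-- ===== VERDICT (by name: the statement is the Claim_ definition above) =====
theorem tokenize_path_py_spec : Claim_equal_tokenize_path_py := by
  intro path _
  unfold Spec_tokenize_path_py
  show tokenize_path_py path = tokenize_path_py_alt path
  exact pvWhole (if PySem.Str.startswith (PySem.Str.replace (PySem.Str.strip path) "/" ".") "settings."
                 then PySem.Str.slice (PySem.Str.replace (PySem.Str.strip path) "/" ".") (some 9) none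
                 else PySem.Str.replace (PySem.Str.strip path) "/" ".")
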